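-- pv_equiv track=rewrite | github.com/iampramodphuyal/httphandler | http_client/_fingerprint/headers.py | _is_same_site
-- ===== SOURCE A (Python) =====
-- def _is_same_site(domain1: str, domain2: str) -> bool:
--     """Check if two domains are same-site (share registrable domain).
--
--     Uses a simple heuristic that works for most cases without requiring
--     a full public suffix list. Handles common multi-level TLDs.
--
--     Args:
--         domain1: First domain (netloc).
--         domain2: Second domain (netloc).
--
--     Returns:
--         True if domains are same-site.
--     """
--     if not domain1 or not domain2:
--         return False
--
--     # Remove port if present
--     domain1 = domain1.split(":")[0].lower()
--     domain2 = domain2.split(":")[0].lower()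
--
--     # Exact match is same-origin, not just same-site, but counts
--     if domain1 == domain2:
--         return True
--
--     # Known multi-level TLDs (common ones)
--     multi_level_tlds = {
--         "co.uk", "org.uk", "gov.uk", "ac.uk",
--         "com.au", "org.au", "gov.au", "edu.au",
--         "co.nz", "org.nz", "gov.nz",
--         "co.jp", "or.jp", "ne.jp",
--         "com.br", "org.br", "gov.br",
--         "co.in", "org.in", "gov.in",
--         "com.cn", "org.cn", "gov.cn",
--     }
--
--     def get_registrable_domain(domain: str) -> str:
--         """Extract registrable domain (eTLD+1)."""
--         parts = domain.split(".")
--         if len(parts) < 2: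
--             return domain
--
--         # Check for multi-level TLD
--         for tld in multi_level_tlds:
--             if domain.endswith("." + tld) or domain == tld:
--                 tld_parts = tld.split(".")
--                 if len(parts) > len(tld_parts):
--                     return ".".join(parts[-(len(tld_parts) + 1):])
--                 return domain
--
--         # Default: take last two parts
--         return ".".join(parts[-2:])
--
--     return get_registrable_domain(domain1) == get_registrable_domain(domain2)
-- ===== SOURCE B (Python) =====
-- def _is_same_site(domain1: str, domain2: str) -> bool:
--     """Check if two domains are same-site (share registrable domain)."""
--     if not domain1 or not domain2:
--         return False
--
--     domain1 = domain1.split(":")[0].lower()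
--     domain2 = domain2.split(":")[0].lower()
--
--     if domain1 == domain2:
--         return True
--
--     multi_level_tlds = {
--         "co.uk", "org.uk", "gov.uk", "ac.uk",
--         "com.au", "org.au", "gov.au", "edu.au",
--         "co.nz", "org.nz", "gov.nz",
--         "co.jp", "or.jp", "ne.jp",
--         "com.br", "org.br", "gov.br",
--         "co.in", "org.in", "gov.in",
--         "com.cn", "org.cn", "gov.cn",
--     }
--
--     def get_registrable_domain(domain: str) -> str:
--         """Extract registrable domain (eTLD+1) by a single suffix-key lookup."""
--         parts = domain.split(".")
--         if len(parts) < 2: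
--             return domain
--         suffix = ".".join(parts[-2:])
--         if suffix in multi_level_tlds:
--             return ".".join(parts[-3:]) if len(parts) > 2 else domain
--         return suffix
--
--     return get_registrable_domain(domain1) == get_registrable_domain(domain2)
-- ===== Notes on version B (the rewrite author's own statement) =====
-- stated objective: simpler
-- what changed: get_registrable_domain no longer loops over the TLD set testing endswith('.'+tld)/equality per element: it joins the last two labels once and does a single keyed set-membership lookup on that suffix, reading the answer off the label structure.
import Mathlib
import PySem

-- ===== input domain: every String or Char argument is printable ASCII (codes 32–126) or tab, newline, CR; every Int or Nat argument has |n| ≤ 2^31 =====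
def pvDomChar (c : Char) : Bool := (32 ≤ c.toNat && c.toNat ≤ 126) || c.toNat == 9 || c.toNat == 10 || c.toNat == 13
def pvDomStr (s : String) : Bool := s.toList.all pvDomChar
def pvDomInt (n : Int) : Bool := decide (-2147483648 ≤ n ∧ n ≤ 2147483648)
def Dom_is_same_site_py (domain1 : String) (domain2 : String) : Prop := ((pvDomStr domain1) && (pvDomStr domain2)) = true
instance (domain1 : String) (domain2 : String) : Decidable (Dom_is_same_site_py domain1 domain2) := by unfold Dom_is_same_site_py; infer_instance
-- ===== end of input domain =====

-- B replaces A's per-TLD endswith loop by one keyed lookup of the two-label suffix (objective: simpler).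

-- ===== PORT A =====
-- the multi_level_tlds set literal (all elements distinct, so the Set is the list itself)
def pvMultiTlds : PySem.Set (List Char) := PySem.Set.ofList
  ["co.uk".toList, "org.uk".toList, "gov.uk".toList, "ac.uk".toList,
   "com.au".toList, "org.au".toList, "gov.au".toList, "edu.au".toList,
   "co.nz".toList, "org.nz".toList, "gov.nz".toList,
   "co.jp".toList, "or.jp".toList, "ne.jp".toList,
   "com.br".toList, "org.br".toList, "gov.br".toList,
   "co.in".toList, "org.in".toList, "gov.in".toList,
   "com.cn".toList, "org.cn".toList, "gov.cn".toList]

-- get_registrable_domain of A: loop `for tld in multi_level_tlds: if … return …` as find?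
-- (the loop's result is independent of the set's iteration order: at most one 2-label tld can match)
def pvGrdA (domain : List Char) : List Char :=
  let parts := PySem.Chars.splitOn domain ['.']
  if parts.length < 2 then domain
  else
    match pvMultiTlds.find? (fun tld => PySem.Chars.endswith domain ('.' :: tld) || domain == tld) with
    | some tld =>
        let tldParts := PySem.Chars.splitOn tld ['.']
        if tldParts.length < parts.length then
          PySem.Chars.join ['.'] (PySem.List.slice parts (some (-((tldParts.length : Int) + 1))) none)
        else domain
    | none => PySem.Chars.join ['.'] (PySem.List.slice parts (some (-2)) none)

-- _is_same_site (A). domain.split(":")[0] can never raise: split returns a nonempty list, so [0] is its head.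
def is_same_site_py (domain1 : String) (domain2 : String) : Bool :=
  if domain1.toList.isEmpty || domain2.toList.isEmpty then false
  else
    let d1 := PySem.Chars.lower ((PySem.Chars.splitOn domain1.toList [':']).headI)
    let d2 := PySem.Chars.lower ((PySem.Chars.splitOn domain2.toList [':']).headI)
    if d1 == d2 then true
    else pvGrdA d1 == pvGrdA d2

-- ===== PORT B =====
-- get_registrable_domain of B: one suffix key, one set lookup
def pvGrdB (domain : List Char) : List Char :=
  let parts := PySem.Chars.splitOn domain ['.']
  if parts.length < 2 then domain
  else
    let suffix := PySem.Chars.join ['.'] (PySem.List.slice parts (some (-2)) none)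
    if pvMultiTlds.contains suffix then
      if 2 < parts.length then PySem.Chars.join ['.'] (PySem.List.slice parts (some (-3)) none)
      else domain
    else suffix

def is_same_site_py_alt (domain1 : String) (domain2 : String) : Bool :=
  if domain1.toList.isEmpty || domain2.toList.isEmpty then false
  else
    let d1 := PySem.Chars.lower ((PySem.Chars.splitOn domain1.toList [':']).headI)
    let d2 := PySem.Chars.lower ((PySem.Chars.splitOn domain2.toList [':']).headI)
    if d1 == d2 then true
    else pvGrdB d1 == pvGrdB d2

-- ===== PRECONDITION & SPEC =====
def Spec_is_same_site_py (domain1 : String) (domain2 : String) (out : Bool) : Prop := out = is_same_site_py_alt domain1 domain2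
instance (domain1 : String) (domain2 : String) (out : Bool) : Decidable (Spec_is_same_site_py domain1 domain2 out) := by unfold Spec_is_same_site_py; infer_instance

-- ===== CLAIM (what is proved, stated in full; the proofs are below) =====
def Claim_equal_is_same_site_py : Prop := ∀ (domain1 : String) (domain2 : String), Dom_is_same_site_py domain1 domain2 → Spec_is_same_site_py domain1 domain2 (is_same_site_py domain1 domain2)

-- ===== LEMMAS AND PROOFS =====

def pvSplitD : List Char → List (List Char)
  | [] => [[]]
  | c :: r => if c = '.' then [] :: pvSplitD r else (pvSplitD r).modifyHead (c :: ·)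

theorem pvSplitD_ne_nil (l : List Char) : pvSplitD l ≠ [] := by
  induction l with
  | nil => simp [pvSplitD]
  | cons c r ih =>
    simp only [pvSplitD]
    split_ifs
    · simp
    · cases h : pvSplitD r with
      | nil => exact absurd h ih
      | cons a t => simp [List.modifyHead]

theorem pvSplitOn_go_eq (fuel : Nat) : ∀ (l cur : List Char) (acc : List (List Char)),
    l.length < fuel →
    PySem.Chars.splitOn.go ['.'] fuel l cur acc
      = acc.reverse ++ ((pvSplitD l).modifyHead (cur.reverse ++ ·)) := by
  induction fuel with
  | zero => intro l cur acc h; omega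
  | succ n ih =>
    intro l cur acc h
    rw [PySem.Chars.splitOn.go.eq_def]
    cases l with
    | nil => simp [pvSplitD]
    | cons c rest =>
      simp only []
      by_cases hc : c = '.'
      · subst hc
        have hp : List.isPrefixOf ['.'] ('.' :: rest) = true := by simp [List.isPrefixOf]
        simp only [hp, if_pos, List.length_cons, List.drop_succ_cons, List.length_nil, List.drop_zero]
        rw [ih rest [] (List.reverse cur :: acc) (by simpa using Nat.lt_of_succ_lt_succ h)]
        simp [pvSplitD]
        cases pvSplitD rest <;> simp
      · have hp : List.isPrefixOf ['.'] (c :: rest) = false := by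
          simp [List.isPrefixOf, Ne.symm hc]
        simp only [hp]
        rw [ih rest (c :: cur) acc (by simpa using Nat.lt_of_succ_lt_succ h)]
        simp only [pvSplitD, if_neg hc]
        cases hr : pvSplitD rest with
        | nil => exact absurd hr (pvSplitD_ne_nil rest)
        | cons a t => simp [List.modifyHead]

theorem pvSplitOn_dot (l : List Char) : PySem.Chars.splitOn l ['.'] = pvSplitD l := by
  rw [PySem.Chars.splitOn, pvSplitOn_go_eq (l.length + 1) l [] [] (by omega)]
  cases pvSplitD l <;> simp

theorem pvSplitD_append (x y : List Char) : pvSplitD (x ++ '.' :: y) = pvSplitD x ++ pvSplitD y := by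
  induction x with
  | nil => simp [pvSplitD]
  | cons c r ih =>
    by_cases hc : c = '.'
    · subst hc; simp [pvSplitD, ih]
    · simp only [List.cons_append, pvSplitD, if_neg hc, ih]
      cases h : pvSplitD r with
      | nil => exact absurd h (pvSplitD_ne_nil r)
      | cons a t => simp

theorem pvSplitD_no_dot (l : List Char) : ∀ p ∈ pvSplitD l, '.' ∉ p := by
  induction l with
  | nil => simp [pvSplitD]
  | cons c r ih =>
    by_cases hc : c = '.'
    · subst hc; simp only [pvSplitD, if_true]
      intro p hp
      rcases List.mem_cons.mp hp with h | h
      · simp [h]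
      · exact ih p h
    · simp only [pvSplitD, if_neg hc]
      cases h : pvSplitD r with
      | nil => exact absurd h (pvSplitD_ne_nil r)
      | cons a t =>
        intro p hp
        rcases List.mem_cons.mp hp with h' | h'
        · subst h'
          intro hmem
          rcases List.mem_cons.mp hmem with h'' | h''
          · exact hc h''.symm
          · exact ih a (h ▸ List.mem_cons_self) h''
        · exact ih p (h ▸ List.mem_cons_of_mem a h')

theorem pvIntercalate_cons (x : List Char) (Y : List (List Char)) (hY : Y ≠ []) :
    List.intercalate ['.'] (x :: Y) = x ++ '.' :: List.intercalate ['.'] Y := by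
  cases Y with
  | nil => exact absurd rfl hY
  | cons y Y' => simp [List.intercalate, List.intersperse]

theorem pvIntercalate_append (X Y : List (List Char)) (hX : X ≠ []) (hY : Y ≠ []) :
    List.intercalate ['.'] (X ++ Y) = List.intercalate ['.'] X ++ '.' :: List.intercalate ['.'] Y := by
  induction X with
  | nil => exact absurd rfl hX
  | cons x X' ih =>
    cases X' with
    | nil =>
      rw [List.singleton_append, pvIntercalate_cons x Y hY]
      simp [List.intercalate]
    | cons a b =>
      rw [List.cons_append, pvIntercalate_cons x ((a :: b) ++ Y) (by simp),
          pvIntercalate_cons x (a :: b) (by simp), ih (by simp), List.append_assoc]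
      simp

theorem pvIntercalate_splitD (l : List Char) : List.intercalate ['.'] (pvSplitD l) = l := by
  induction l with
  | nil => simp [pvSplitD, List.intercalate]
  | cons c r ih =>
    by_cases hc : c = '.'
    · subst hc
      rw [show pvSplitD ('.' :: r) = [] :: pvSplitD r from by simp [pvSplitD],
          pvIntercalate_cons [] (pvSplitD r) (pvSplitD_ne_nil r), ih]
      simp
    · rw [show pvSplitD (c :: r) = (pvSplitD r).modifyHead (c :: ·) from by simp [pvSplitD, hc]]
      cases h : pvSplitD r with
      | nil => exact absurd h (pvSplitD_ne_nil r)
      | cons a t =>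
        cases t with
        | nil => rw [h] at ih; simp [List.intercalate] at ih ⊢; simpa [ih]
        | cons b t' =>
          rw [List.modifyHead]
          rw [pvIntercalate_cons (c :: a) (b :: t') (by simp),
              ← ih, h, pvIntercalate_cons a (b :: t') (by simp)]
          simp

theorem pvSplitD_dotfree (l : List Char) (h : '.' ∉ l) : pvSplitD l = [l] := by
  induction l with
  | nil => simp [pvSplitD]
  | cons c r ih =>
    have hc : c ≠ '.' := fun hc => h (hc ▸ List.mem_cons_self)
    rw [show pvSplitD (c :: r) = (pvSplitD r).modifyHead (c :: ·) from by simp [pvSplitD, hc],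
        ih (fun hm => h (List.mem_cons_of_mem c hm))]
    rfl

theorem pvDotfree_cancel (x x' y y' : List Char) (hx : '.' ∉ x) (hx' : '.' ∉ x')
    (h : x ++ '.' :: y = x' ++ '.' :: y') : x = x' ∧ y = y' := by
  induction x generalizing x' with
  | nil =>
    cases x' with
    | nil => simpa using h
    | cons c r =>
      simp only [List.nil_append, List.cons_append, List.cons.injEq] at h
      exact absurd (h.1 ▸ List.mem_cons_self) hx'
  | cons c r ih =>
    cases x' with
    | nil =>
      simp only [List.nil_append, List.cons_append, List.cons.injEq] at h
      exact absurd (h.1.symm ▸ List.mem_cons_self) hx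
    | cons c' r' =>
      simp only [List.cons_append, List.cons.injEq] at h
      obtain ⟨h1, h2⟩ := h
      have := ih r' (fun m => hx (List.mem_cons_of_mem c m))
        (fun m => hx' (List.mem_cons_of_mem c' m)) h2
      exact ⟨by rw [h1, this.1], this.2⟩

theorem pvFind?_beq_of_mem (l : List (List Char)) (x : List Char) (h : x ∈ l) :
    l.find? (fun t => x == t) = some x := by
  induction l with
  | nil => simp at h
  | cons a l ih =>
    by_cases hx : x = a
    · subst hx; simp [List.find?]
    · rw [List.find?_cons_of_neg (by simp [hx])]
      exact ih (List.mem_of_ne_of_mem hx h)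

theorem pvFind?_congr (l : List (List Char)) (p q : List Char → Bool)
    (h : ∀ a ∈ l, p a = q a) : l.find? p = l.find? q := by
  induction l with
  | nil => rfl
  | cons a l ih =>
    have ha := h a List.mem_cons_self
    by_cases hp : p a = true
    · rw [List.find?_cons_of_pos hp, List.find?_cons_of_pos (ha ▸ hp)]
    · rw [List.find?_cons_of_neg (by simpa using hp),
          List.find?_cons_of_neg (by simpa [← ha] using hp)]
      exact ih (fun b hb => h b (List.mem_cons_of_mem a hb))

theorem pvKeyIff (d t a b : List Char) (hP : 2 ≤ (pvSplitD d).length)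
    (ht : t = a ++ '.' :: b) (ha : '.' ∉ a) (hb : '.' ∉ b) :
    (PySem.Chars.endswith d ('.' :: t) || d == t)
      = (List.intercalate ['.'] ((pvSplitD d).drop ((pvSplitD d).length - 2)) == t) := by
  have hlen2 : ((pvSplitD d).drop ((pvSplitD d).length - 2)).length = 2 := by
    rw [List.length_drop]; omega
  obtain ⟨p2, p1, hdp⟩ := List.length_eq_two.mp hlen2
  have hp2 : '.' ∉ p2 :=
    pvSplitD_no_dot d p2 (List.drop_subset _ _ (hdp ▸ List.mem_cons_self))
  have hp1 : '.' ∉ p1 :=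
    pvSplitD_no_dot d p1 (List.drop_subset _ _ (hdp ▸ (by simp : p1 ∈ [p2, p1])))
  have hsuf : List.intercalate ['.'] ((pvSplitD d).drop ((pvSplitD d).length - 2))
      = p2 ++ '.' :: p1 := by
    rw [hdp, pvIntercalate_cons p2 [p1] (by simp)]
    simp [List.intercalate]
  have htsplit : pvSplitD t = [a, b] := by
    rw [ht, pvSplitD_append, pvSplitD_dotfree a ha, pvSplitD_dotfree b hb]; rfl
  rw [Bool.eq_iff_iff]
  simp only [Bool.or_eq_true, beq_iff_eq, PySem.Chars.endswith_iff, hsuf]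
  constructor
  · rintro (hsfx | heq)
    · obtain ⟨p, hp⟩ := hsfx
      have hd : pvSplitD d = pvSplitD p ++ [a, b] := by
        rw [← hp, ht, pvSplitD_append, ← ht, htsplit]
      have : (pvSplitD d).drop ((pvSplitD d).length - 2) = [a, b] := by
        rw [hd, show (pvSplitD p ++ [a, b]).length - 2 = (pvSplitD p).length from by simp,
            List.drop_left]
      rw [this] at hdp
      simp only [List.cons.injEq] at hdp
      rw [hdp.1.symm, hdp.2.1.symm, ht]
    · have hd : pvSplitD d = [a, b] := heq ▸ htsplit
      have : (pvSplitD d).drop ((pvSplitD d).length - 2) = [a, b] := by rw [hd]; rfl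
      rw [this] at hdp
      simp only [List.cons.injEq] at hdp
      rw [hdp.1.symm, hdp.2.1.symm, ht]
  · intro hsufeq
    obtain ⟨hpa, hpb⟩ := pvDotfree_cancel p2 a p1 b hp2 ha (by rw [← ht]; exact hsufeq)
    have hrecon : d = List.intercalate ['.']
        ((pvSplitD d).take ((pvSplitD d).length - 2) ++ [p2, p1]) := by
      rw [← hdp, List.take_append_drop, pvIntercalate_splitD]
    cases htake : (pvSplitD d).take ((pvSplitD d).length - 2) with
    | nil =>
      right
      rw [hrecon, htake, List.nil_append, pvIntercalate_cons p2 [p1] (by simp)]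
      simp [List.intercalate, hpa, hpb, ht]
    | cons q qs =>
      left
      rw [hrecon, htake, pvIntercalate_append (q :: qs) [p2, p1] (by simp) (by simp)]
      refine ⟨List.intercalate ['.'] (q :: qs), ?_⟩
      rw [pvIntercalate_cons p2 [p1] (by simp)]
      simp [List.intercalate, hpa, hpb, ht]

theorem pvTlds_split_len : ∀ t ∈ pvMultiTlds, (pvSplitD t).length = 2 := by decide

theorem pvGrd_eq (d : List Char) : pvGrdA d = pvGrdB d := by
  unfold pvGrdA pvGrdB
  simp only [pvSplitOn_dot]
  by_cases hlt : (pvSplitD d).length < 2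
  · simp [hlt]
  · have hP : 2 ≤ (pvSplitD d).length := by omega
    simp only [if_neg hlt]
    rw [PySem.List.slice_from_neg_ofNat (pvSplitD d) 2 (by norm_num)]
    set P := pvSplitD d with hPdef
    set suf := PySem.Chars.join ['.'] (P.drop (P.length - 2)) with hsufdef
    have hjoin : suf = List.intercalate ['.'] (P.drop (P.length - 2)) := rfl
    have hlen2 : (P.drop (P.length - 2)).length = 2 := by rw [List.length_drop]; omega
    obtain ⟨p2, p1, hdp⟩ := List.length_eq_two.mp hlen2
    have hp2 : '.' ∉ p2 := pvSplitD_no_dot d p2 (List.drop_subset _ _ (hdp ▸ List.mem_cons_self))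
    have hp1 : '.' ∉ p1 := pvSplitD_no_dot d p1 (List.drop_subset _ _ (hdp ▸ (by simp : p1 ∈ [p2, p1])))
    have hsuf : suf = p2 ++ '.' :: p1 := by
      rw [hjoin, hdp, pvIntercalate_cons p2 [p1] (by simp)]
      simp [List.intercalate]
    have hsufsplit : pvSplitD suf = [p2, p1] := by
      rw [hsuf, pvSplitD_append, pvSplitD_dotfree p2 hp2, pvSplitD_dotfree p1 hp1]
      rfl
    -- pointwise: A's loop condition agrees with "suffix key equals tld"
    have hpt : ∀ t ∈ pvMultiTlds,
        (PySem.Chars.endswith d ('.' :: t) || d == t) = (suf == t) := by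
      intro t ht
      have h2 := pvTlds_split_len t ht
      obtain ⟨a, b, hab⟩ := List.length_eq_two.mp h2
      have ha : '.' ∉ a := pvSplitD_no_dot t a (hab ▸ List.mem_cons_self)
      have hb : '.' ∉ b := pvSplitD_no_dot t b (hab ▸ (by simp : b ∈ [a, b]))
      have ht' : t = a ++ '.' :: b := by
        conv_lhs => rw [← pvIntercalate_splitD t]
        rw [hab, pvIntercalate_cons a [b] (by simp)]
        simp [List.intercalate]
      rw [hjoin, pvKeyIff d t a b hP ht' ha hb]
    rw [pvFind?_congr _ _ _ hpt]
    by_cases hmem : suf ∈ pvMultiTlds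
    · rw [pvFind?_beq_of_mem _ _ hmem,
          show pvMultiTlds.contains suf = true from by
            simpa [PySem.Set.contains] using hmem]
      simp only [hsufsplit, List.length_cons, List.length_nil]
      norm_num
    · rw [List.find?_eq_none.mpr (fun t ht => by
            simp only [beq_iff_eq]
            exact fun h => hmem (h ▸ ht)),
          show pvMultiTlds.contains suf = false from by
            simpa [PySem.Set.contains] using hmem]
      simp

-- ===== VERDICT (by name: the statement is the Claim_ definition above) =====
theorem is_same_site_py_spec : Claim_equal_is_same_site_py := by
  intro d1 d2 _
  unfold Spec_is_same_site_py is_same_site_py is_same_site_py_alt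
  simp only [pvGrd_eq]
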